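-- pv_equiv track=rewrite | github.com/nyucel/blm2010 | vize/180401030.py | x_degerleri
-- ===== SOURCE A (Python) =====
-- def x_degerleri(list, n):
--     valuex = []
--     for i in range(13):
--         x = 0
--         for k in range(n):
--             x += (k+1)**i
--         valuex.append(x)
--     return valuex
-- ===== SOURCE B (Python) =====
-- # B: single pass over k with thirteen scalar accumulators and incrementally
-- # multiplied powers (no exponentiation, no inner pass per exponent).
-- def x_degerleri(list, n):
--     s0=s1=s2=s3=s4=s5=s6=s7=s8=s9=s10=s11=s12=0
--     for k in range(n):
--         b = k + 1
--         p = b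
--         s0 += 1; s1 += p; p *= b; s2 += p; p *= b; s3 += p; p *= b
--         s4 += p; p *= b; s5 += p; p *= b; s6 += p; p *= b
--         s7 += p; p *= b; s8 += p; p *= b; s9 += p; p *= b
--         s10 += p; p *= b; s11 += p; p *= b; s12 += p
--     return [s0,s1,s2,s3,s4,s5,s6,s7,s8,s9,s10,s11,s12]
-- ===== Notes on version B (the rewrite author's own statement) =====
-- stated objective: faster
-- what changed: Interchanges the loops: one single pass over k maintaining thirteen scalar power-sum accumulators updated by incremental multiplication, instead of 13 separate passes each recomputing (k+1)**i by exponentiation.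
import Mathlib
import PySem

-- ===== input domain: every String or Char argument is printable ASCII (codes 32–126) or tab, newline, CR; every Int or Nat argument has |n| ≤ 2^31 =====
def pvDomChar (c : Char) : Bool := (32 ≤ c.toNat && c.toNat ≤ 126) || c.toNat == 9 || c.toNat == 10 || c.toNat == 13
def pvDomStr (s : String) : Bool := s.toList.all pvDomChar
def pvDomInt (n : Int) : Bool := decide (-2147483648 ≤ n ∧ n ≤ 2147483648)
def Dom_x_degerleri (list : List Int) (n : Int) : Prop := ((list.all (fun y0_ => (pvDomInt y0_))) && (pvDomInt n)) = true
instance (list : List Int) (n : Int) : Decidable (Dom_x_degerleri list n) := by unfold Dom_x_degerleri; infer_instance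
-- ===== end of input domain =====

-- B replaces A's 13 exponentiating passes by ONE pass over k with thirteen scalar
-- accumulators and incrementally multiplied powers (objective: faster, constant factor).

-- ===== PORT A =====
def x_degerleri (list : List Int) (n : Int) : List Int :=
  (PySem.List.pyRange 0 13 1).foldl
    (fun valuex i =>
      valuex ++ [(PySem.List.pyRange 0 n 1).foldl (fun x k => x + (k + 1) ^ i.toNat) 0])
    []

-- ===== PORT B =====
structure BState where
  s0 : Int
  s1 : Int
  s2 : Int
  s3 : Int
  s4 : Int
  s5 : Int
  s6 : Int
  s7 : Int
  s8 : Int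
  s9 : Int
  s10 : Int
  s11 : Int
  s12 : Int
  deriving DecidableEq, Repr

def bStep (st : BState) (k : Int) : BState :=
  let b := k + 1
  let p := b
  let s0 := st.s0 + 1
  let s1 := st.s1 + p
  let p := p * b
  let s2 := st.s2 + p
  let p := p * b
  let s3 := st.s3 + p
  let p := p * b
  let s4 := st.s4 + p
  let p := p * b
  let s5 := st.s5 + p
  let p := p * b
  let s6 := st.s6 + p
  let p := p * b
  let s7 := st.s7 + p
  let p := p * b
  let s8 := st.s8 + p
  let p := p * b
  let s9 := st.s9 + p
  let p := p * b
  let s10 := st.s10 + p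
  let p := p * b
  let s11 := st.s11 + p
  let p := p * b
  let s12 := st.s12 + p
  ⟨s0, s1, s2, s3, s4, s5, s6, s7, s8, s9, s10, s11, s12⟩

def x_degerleri_alt (list : List Int) (n : Int) : List Int :=
  let st := (PySem.List.pyRange 0 n 1).foldl bStep ⟨0,0,0,0,0,0,0,0,0,0,0,0,0⟩
  [st.s0, st.s1, st.s2, st.s3, st.s4, st.s5, st.s6, st.s7, st.s8, st.s9, st.s10, st.s11, st.s12]

-- ===== PRECONDITION & SPEC =====
def Spec_x_degerleri (list : List Int) (n : Int) (out : List Int) : Prop := out = x_degerleri_alt list n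
instance (list : List Int) (n : Int) (out : List Int) : Decidable (Spec_x_degerleri list n out) := by unfold Spec_x_degerleri; infer_instance

-- ===== CLAIM (what is proved, stated in full; the proofs are below) =====
def Claim_equal_x_degerleri : Prop := ∀ (list : List Int) (n : Int), Dom_x_degerleri list n → Spec_x_degerleri list n (x_degerleri list n)

-- ===== LEMMAS AND PROOFS =====

/-- the power sum A's inner loop computes for exponent `i`. -/
def Ai (i : Nat) (n : Int) : Int :=
  (PySem.List.pyRange 0 n 1).foldl (fun x k => x + (k + 1) ^ i) 0

lemma Ai_nonpos (i : Nat) (n : Int) (h : n ≤ 0) : Ai i n = 0 := by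
  simp [Ai, PySem.List.pyRange_one_eq_nil h]

lemma Ai_succ (i : Nat) (m : Nat) :
    Ai i ((m : Int) + 1) = Ai i m + ((m : Int) + 1) ^ i := by
  unfold Ai
  rw [PySem.List.pyRange_one_succ_right (by exact_mod_cast Int.natCast_nonneg m)]
  simp

lemma A_eq (list : List Int) (n : Int) :
    x_degerleri list n =
      [Ai 0 n, Ai 1 n, Ai 2 n, Ai 3 n, Ai 4 n, Ai 5 n, Ai 6 n,
       Ai 7 n, Ai 8 n, Ai 9 n, Ai 10 n, Ai 11 n, Ai 12 n] := by
  rw [x_degerleri,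
    show PySem.List.pyRange 0 13 1 = [0,1,2,3,4,5,6,7,8,9,10,11,12] from by decide]
  rfl

lemma B_fold_eq (m : Nat) :
    (PySem.List.pyRange 0 (m : Int) 1).foldl bStep ⟨0,0,0,0,0,0,0,0,0,0,0,0,0⟩ =
      ⟨Ai 0 m, Ai 1 m, Ai 2 m, Ai 3 m, Ai 4 m, Ai 5 m, Ai 6 m,
       Ai 7 m, Ai 8 m, Ai 9 m, Ai 10 m, Ai 11 m, Ai 12 m⟩ := by
  induction m with
  | zero => simp [PySem.List.pyRange_one_eq_nil (by norm_num : (0:Int) ≤ 0)]; decide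
  | succ m ih =>
    have h1 : ((m + 1 : Nat) : Int) = (m : Int) + 1 := by push_cast; ring
    rw [h1, PySem.List.pyRange_one_succ_right (by exact_mod_cast Int.natCast_nonneg m),
      List.foldl_append, ih]
    simp only [List.foldl, bStep]
    have hA : ∀ i : Nat, Ai i ((m : Int) + 1) = Ai i m + ((m : Int) + 1) ^ i := fun i => Ai_succ i m
    refine BState.mk.injEq .. ▸ ?_
    simp only [hA]
    refine ⟨?_, ?_, ?_, ?_, ?_, ?_, ?_, ?_, ?_, ?_, ?_, ?_, ?_⟩ <;> ring

lemma B_eq (list : List Int) (n : Int) :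
    x_degerleri_alt list n =
      [Ai 0 n, Ai 1 n, Ai 2 n, Ai 3 n, Ai 4 n, Ai 5 n, Ai 6 n,
       Ai 7 n, Ai 8 n, Ai 9 n, Ai 10 n, Ai 11 n, Ai 12 n] := by
  by_cases h : n ≤ 0
  · simp [x_degerleri_alt, PySem.List.pyRange_one_eq_nil h, Ai_nonpos _ _ h]
  · have hn : n = (n.toNat : Int) := (Int.toNat_of_nonneg (by omega)).symm
    rw [x_degerleri_alt, hn, B_fold_eq]

-- ===== VERDICT (by name: the statement is the Claim_ definition above) =====
theorem x_degerleri_spec : Claim_equal_x_degerleri := by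
  intro list n _
  unfold Spec_x_degerleri
  rw [A_eq, B_eq]
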